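-- pv_equiv track=rewrite | github.com/Mithrasri-Kadarla/Summer-Training-2024 | 14th june 2024/recursion even odd sum.py | add_even_with_odds
-- ===== SOURCE A (Python) =====
-- def add_even_with_odds(even, b, result=None):
--     if result is None:
--         result = []
--
--     if not b:  # Base case: if list `b` is empty, return the result
--         return result
--
--     if b[0] % 2 != 0:  # If the current element of `b` is odd
--         result.append(even + b[0])
--
--     # Recur with the remaining elements of `b`
--     return add_even_with_odds(even, b[1:], result)
-- ===== SOURCE B (Python) =====
-- def add_even_with_odds(even, b, result=None):
--     if result is None:
--         result = []
--     result.extend(even + x for x in b if x % 2 != 0)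
--     return result
-- ===== Notes on version B (the rewrite author's own statement) =====
-- stated objective: faster
-- what changed: Replaces accumulator-passing recursion that repeatedly slices b[1:] with a single extend of a filtered comprehension over b; the same in-place mutation of a passed-in result list is preserved.
import Mathlib
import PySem

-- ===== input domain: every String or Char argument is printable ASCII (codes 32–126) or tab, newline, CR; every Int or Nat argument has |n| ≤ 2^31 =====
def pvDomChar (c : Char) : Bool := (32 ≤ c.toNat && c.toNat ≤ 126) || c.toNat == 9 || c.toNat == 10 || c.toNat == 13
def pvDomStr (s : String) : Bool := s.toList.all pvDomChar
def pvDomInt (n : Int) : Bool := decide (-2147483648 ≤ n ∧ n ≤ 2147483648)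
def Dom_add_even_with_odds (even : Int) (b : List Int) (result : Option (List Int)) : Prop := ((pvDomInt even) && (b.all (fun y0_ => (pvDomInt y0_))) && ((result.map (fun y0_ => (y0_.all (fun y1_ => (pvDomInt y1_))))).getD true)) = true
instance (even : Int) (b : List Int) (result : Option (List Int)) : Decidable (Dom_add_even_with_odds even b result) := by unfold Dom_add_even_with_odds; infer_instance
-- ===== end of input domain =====

-- ===== PORT A =====
-- Return-value equivalence only: both Pythons mutate a passed-in `result` list identically.
def add_even_with_odds (even : Int) (b : List Int) (result : Option (List Int)) : List Int :=
  let res := match result with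
    | none => []
    | some r => r
  match b with
  | [] => res
  | x :: rest =>
    let res := if PySem.Int.mod x 2 ≠ 0 then res ++ [even + x] else res
    add_even_with_odds even rest (some res)

-- ===== PORT B =====
-- B: extend the result with a filtered-and-mapped pass over b (simpler, no recursion/slicing).
def add_even_with_odds_alt (even : Int) (b : List Int) (result : Option (List Int)) : List Int :=
  let res := match result with
    | none => []
    | some r => r
  res ++ (b.filter (fun x => PySem.Int.mod x 2 ≠ 0)).map (fun x => even + x)

-- ===== PRECONDITION & SPEC =====
def Spec_add_even_with_odds (even : Int) (b : List Int) (result : Option (List Int)) (out : List Int) : Prop := out = add_even_with_odds_alt even b result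
instance (even : Int) (b : List Int) (result : Option (List Int)) (out : List Int) : Decidable (Spec_add_even_with_odds even b result out) := by unfold Spec_add_even_with_odds; infer_instance

-- ===== CLAIM (what is proved, stated in full; the proofs are below) =====
def Claim_equal_add_even_with_odds : Prop := ∀ (even : Int) (b : List Int) (result : Option (List Int)), Dom_add_even_with_odds even b result → Spec_add_even_with_odds even b result (add_even_with_odds even b result)

-- ===== LEMMAS AND PROOFS =====

theorem aewo_some (even : Int) (b : List Int) (res : List Int) :
    add_even_with_odds even b (some res)
      = res ++ (b.filter (fun x => PySem.Int.mod x 2 ≠ 0)).map (fun x => even + x) := by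
  induction b generalizing res with
  | nil => simp [add_even_with_odds]
  | cons x rest ih =>
    simp only [add_even_with_odds, List.filter_cons]
    by_cases h : x % 2 = 1 <;> simp [h, ih]

-- ===== VERDICT (by name: the statement is the Claim_ definition above) =====
theorem add_even_with_odds_spec : Claim_equal_add_even_with_odds := by
  intro even b result _
  unfold Spec_add_even_with_odds add_even_with_odds_alt
  cases result with
  | none =>
    cases b with
    | nil => simp [add_even_with_odds]
    | cons x rest =>
      simp only [add_even_with_odds, List.filter_cons]
      by_cases h : x % 2 = 1 <;> simp [h, aewo_some]
  | some r => simpa using aewo_some even b r
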